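-- pv_equiv track=rewrite | github.com/sheldonpc/backend_fastapi | app/middlewares/error_handler.py | is_fastapi_builtin_route
-- ===== SOURCE A (Python) =====
-- def is_fastapi_builtin_route(path: str) -> bool:
--     """
--     检查是否是FastAPI内置路由
--     """
--     builtin_routes = [
--         "/docs", "/redoc", "/openapi.json",
--         "/docs/oauth2-redirect", "/api/docs", "/api/redoc"
--     ]
--
--     # 检查完全匹配
--     if path in builtin_routes:
--         return True
--
--     # 检查前缀匹配
--     for route in builtin_routes:
--         if path.startswith(route + "/"):
--             return True
--
--     return False
-- ===== SOURCE B (Python) =====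
-- def is_fastapi_builtin_route(path: str) -> bool:
--     routes = {
--         "/docs", "/redoc", "/openapi.json",
--         "/docs/oauth2-redirect", "/api/docs", "/api/redoc"
--     }
--     # single pass: grow the prefix char by char; a built-in prefix match means
--     # the prefix accumulated just before some '/' is itself a route
--     prefix = ""
--     for ch in path:
--         if ch == '/' and prefix in routes:
--             return True
--         prefix += ch
--     return path in routes
-- ===== Notes on version B (the rewrite author's own statement) =====
-- stated objective: alternative
-- what changed: Instead of scanning the route list twice (exact match, then startswith(route+'/') per route), B makes one pass over the path growing a prefix accumulator and tests set membership of the prefix at each slash, with a final whole-path membership test.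
import Mathlib
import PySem

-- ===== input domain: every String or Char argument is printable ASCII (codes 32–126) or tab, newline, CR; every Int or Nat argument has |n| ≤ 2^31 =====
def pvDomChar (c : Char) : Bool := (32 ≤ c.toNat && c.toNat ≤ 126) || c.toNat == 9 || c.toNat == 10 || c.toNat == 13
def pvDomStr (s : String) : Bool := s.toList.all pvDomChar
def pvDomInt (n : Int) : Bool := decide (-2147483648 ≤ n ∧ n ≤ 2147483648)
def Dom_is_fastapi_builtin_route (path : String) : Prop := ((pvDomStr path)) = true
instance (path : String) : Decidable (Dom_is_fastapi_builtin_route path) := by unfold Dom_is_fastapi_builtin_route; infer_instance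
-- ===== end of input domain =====

-- B replaces A's two scans over the route list (exact match + startswith per route) by a
-- single accumulator pass over the path testing set membership at each slash (alternative decomposition).


-- ===== PORT A =====
-- the literal builtin_routes list of A
def pvBuiltinRoutes : List (List Char) :=
  ["/docs".toList, "/redoc".toList, "/openapi.json".toList,
   "/docs/oauth2-redirect".toList, "/api/docs".toList, "/api/redoc".toList]

def is_fastapi_builtin_route (path : String) : Bool :=
  -- if path in builtin_routes: return True
  if pvBuiltinRoutes.contains path.toList then true
  else
    -- for route in builtin_routes: if path.startswith(route + "/"): return True
    pvBuiltinRoutes.any (fun route => PySem.Chars.startswith path.toList (route ++ ['/']))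

-- ===== PORT B =====
-- the route set of B (literals are distinct, so ofList keeps them all)
def pvRouteSet : PySem.Set (List Char) :=
  PySem.Set.ofList
    ["/docs".toList, "/redoc".toList, "/openapi.json".toList,
     "/docs/oauth2-redirect".toList, "/api/docs".toList, "/api/redoc".toList]

-- the for-loop of B: prefix accumulator, early True at a slash whose prefix is a route
def pvGo (acc : List Char) : List Char → Bool
  | [] => false
  | c :: rest =>
      if c == '/' && PySem.Set.contains pvRouteSet acc then true
      else pvGo (acc ++ [c]) rest

def is_fastapi_builtin_route_alt (path : String) : Bool :=
  -- the loop, then: return path in routes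
  pvGo [] path.toList || PySem.Set.contains pvRouteSet path.toList

-- ===== PRECONDITION & SPEC =====
def Spec_is_fastapi_builtin_route (path : String) (out : Bool) : Prop := out = is_fastapi_builtin_route_alt path
instance (path : String) (out : Bool) : Decidable (Spec_is_fastapi_builtin_route path out) := by unfold Spec_is_fastapi_builtin_route; infer_instance

-- ===== CLAIM (what is proved, stated in full; the proofs are below) =====
def Claim_equal_is_fastapi_builtin_route : Prop := ∀ (path : String), Dom_is_fastapi_builtin_route path → Spec_is_fastapi_builtin_route path (is_fastapi_builtin_route path)

-- ===== LEMMAS AND PROOFS =====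

-- path.startswith(route + "/") holds exactly when some slash of path cuts it at route
lemma startswith_slash_iff (cs r : List Char) :
    PySem.Chars.startswith cs (r ++ ['/']) = true ↔
      ∃ i, ∃ _ : i < cs.length, cs[i] = '/' ∧ cs.take i = r := by
  rw [PySem.Chars.startswith_iff]
  constructor
  · rintro ⟨t, ht⟩
    refine ⟨r.length, ?_, ?_, ?_⟩ <;> subst ht <;> simp
  · rintro ⟨i, hi, hc, ht⟩
    refine ⟨cs.drop (i+1), ?_⟩
    rw [List.append_assoc]
    conv_rhs => rw [← List.take_append_drop i cs]
    rw [ht, List.drop_eq_getElem_cons hi, hc]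
    rfl

-- characterisation of B's loop: it fires iff some slash of rest cuts acc ++ rest at a route prefix
lemma pvGo_iff (rest acc : List Char) :
    pvGo acc rest = true ↔
      ∃ k, ∃ _ : k < rest.length,
        rest[k] = '/' ∧ PySem.Set.contains pvRouteSet (acc ++ rest.take k) = true := by
  induction rest generalizing acc with
  | nil => simp [pvGo]
  | cons c rest ih =>
    rw [pvGo]
    split_ifs with h
    · simp only [Bool.and_eq_true, beq_iff_eq] at h
      simp only [true_iff]
      exact ⟨0, by simp, by simpa using h.1, by simpa using h.2⟩
    · rw [ih]
      constructor
      · rintro ⟨k, hk, hc, hm⟩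
        exact ⟨k + 1, by simpa using hk, by simpa using hc, by simpa using hm⟩
      · rintro ⟨k, hk, hc, hm⟩
        cases k with
        | zero =>
          exfalso
          apply h
          simp only [Bool.and_eq_true, beq_iff_eq]
          exact ⟨by simpa using hc, by simpa using hm⟩
        | succ k =>
          exact ⟨k, by simpa using hk, by simpa using hc, by simpa using hm⟩

-- ===== VERDICT (by name: the statement is the Claim_ definition above) =====

theorem is_fastapi_builtin_route_spec : Claim_equal_is_fastapi_builtin_route := by
  intro path _
  unfold Spec_is_fastapi_builtin_route
  unfold is_fastapi_builtin_route is_fastapi_builtin_route_alt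
  have hc : ∀ x : List Char, PySem.Set.contains pvRouteSet x = pvBuiltinRoutes.contains x := by
    have hset : (pvRouteSet : List (List Char)) = pvBuiltinRoutes := by decide
    intro x
    rw [hset]
    simp [PySem.Set.contains]
  rw [Bool.eq_iff_iff, Bool.or_eq_true]
  simp only [hc]
  split_ifs with h
  · exact ⟨fun _ => Or.inr h, fun _ => rfl⟩
  · rw [pvGo_iff]
    simp only [List.nil_append, List.any_eq_true]
    constructor
    · rintro ⟨r, hr, hsw⟩
      obtain ⟨i, hi, hsl, ht⟩ := (startswith_slash_iff _ _).mp hsw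
      exact Or.inl ⟨i, hi, hsl, by rw [hc, ht, List.contains_iff_mem]; exact hr⟩
    · rintro (⟨k, hk, hsl, hm⟩ | hcont)
      · rw [hc, List.contains_iff_mem] at hm
        exact ⟨_, hm, (startswith_slash_iff _ _).mpr ⟨k, hk, hsl, rfl⟩⟩
      · exact absurd hcont h
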